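-- pv_equiv track=rewrite | github.com/pattonw/funlib.match | funlib/match/get_constraints.py | get_degree_constraint
-- ===== SOURCE A (Python) =====
-- def get_degree_constraint(node_matchings, tree_degree, edge_matchings, tree_nodes):
--     """
--     Now that we allow chains, it is possible that multiple
--     chains pass through the same node, or a chain might pass through
--     a branch point. To avoid this we add a degree constraint.
--
--     given x_ij for all i in V(G) and j in V(T)
--     given y_ab_cd for all (a, b) in E(G) and (c, d) in E(T)
--     let degree(None) = 2
--     For every node i in V(G)
--         let N = SUM(degree(c)*x_ic) for all c in V(T) Union None
--         let y = SUM(y_ai_cd) + SUM(y_ia_cd)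
--             for all a adjacent to i, and all (c,d) in E(T)
--         y - N <= 0
--     """
--     constraints = {}
--     for i, (g_n, t_n) in enumerate(node_matchings):
--         g_n_degree_constraint = constraints.setdefault(g_n, [])
--         g_n_degree_constraint.append((i, -tree_degree.get(t_n, 2)))
--
--     for i, (g_u, g_v, t_u, t_v) in enumerate(edge_matchings):
--         constraints.get(g_u, []).append((i + len(node_matchings), 1))
--         constraints.get(g_v, []).append((i + len(node_matchings), 1))
--
--     return list(constraints.values()), "LessEqual", 0
-- ===== SOURCE B (Python) =====
-- def get_degree_constraint(node_matchings, tree_degree, edge_matchings, tree_nodes):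
--     n = len(node_matchings)
--     # distinct graph nodes in first-occurrence order
--     seen = []
--     for g_n, _t_n in node_matchings:
--         if g_n not in seen:
--             seen.append(g_n)
--     rows = []
--     for g in seen:
--         row = [(i, -tree_degree.get(t_n, 2))
--                for i, (g_n, t_n) in enumerate(node_matchings) if g_n == g]
--         for i, (g_u, g_v, _t_u, _t_v) in enumerate(edge_matchings):
--             if g_u == g:
--                 row.append((i + n, 1))
--             if g_v == g:
--                 row.append((i + n, 1))
--         rows.append(row)
--     return rows, "LessEqual", 0
-- ===== Notes on version B (the rewrite author's own statement) =====
-- stated objective: alternative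
-- what changed: A builds one mutable dict of lists in two phases (setdefault-grouping then in-place appends); B uses no constraints dict at all: it first computes the distinct graph nodes in first-occurrence order, then builds each output row independently by rescanning node_matchings and edge_matchings for that node (group-by-rescan), so edges on unmatched endpoints are dropped because no row exists for them.
import Mathlib
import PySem

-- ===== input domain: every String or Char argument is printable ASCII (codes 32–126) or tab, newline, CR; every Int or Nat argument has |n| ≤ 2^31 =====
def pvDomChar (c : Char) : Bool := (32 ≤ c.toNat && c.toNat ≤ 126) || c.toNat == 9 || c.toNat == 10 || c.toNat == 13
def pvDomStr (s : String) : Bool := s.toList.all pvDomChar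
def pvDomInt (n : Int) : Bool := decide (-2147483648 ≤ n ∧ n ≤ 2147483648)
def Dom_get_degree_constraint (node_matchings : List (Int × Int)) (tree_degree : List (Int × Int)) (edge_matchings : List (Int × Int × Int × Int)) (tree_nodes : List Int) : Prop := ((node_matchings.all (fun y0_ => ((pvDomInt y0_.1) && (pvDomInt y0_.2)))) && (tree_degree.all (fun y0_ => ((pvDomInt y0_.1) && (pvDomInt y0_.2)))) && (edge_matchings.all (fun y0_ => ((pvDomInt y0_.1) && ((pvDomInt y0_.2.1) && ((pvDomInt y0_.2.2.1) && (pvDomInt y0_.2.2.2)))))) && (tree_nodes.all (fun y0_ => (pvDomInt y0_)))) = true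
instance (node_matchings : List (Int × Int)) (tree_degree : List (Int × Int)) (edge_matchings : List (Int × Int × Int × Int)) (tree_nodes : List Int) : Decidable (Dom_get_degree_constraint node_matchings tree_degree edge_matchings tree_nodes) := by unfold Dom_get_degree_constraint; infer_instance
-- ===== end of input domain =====

-- B drops A's mutable dict of lists entirely: it lists the distinct graph nodes in
-- first-occurrence order and builds each row by rescanning both matchings (objective: alternative, not faster).

-- ===== PORT A =====
-- literal transliteration of A: one dict, setdefault/append over node_matchings, then
-- conditional appends (constraints.get(g, []).append only lands when g is a key) over edge_matchings.
def get_degree_constraint (node_matchings : List (Int × Int)) (tree_degree : List (Int × Int)) (edge_matchings : List (Int × Int × Int × Int)) (tree_nodes : List Int) : (List (List (Int × Int))) × String × Int :=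
  let tdd := PySem.Dict.ofList tree_degree
  let c1 := (PySem.List.enumerate node_matchings 0).foldl
    (fun d p => d.modify p.2.1 [] (fun l => l ++ [(p.1, -(tdd.getD p.2.2 2))])) PySem.Dict.empty
  let c2 := (PySem.List.enumerate edge_matchings 0).foldl
    (fun d p =>
      let d1 := if d.contains p.2.1 then d.modify p.2.1 [] (fun l => l ++ [(p.1 + (node_matchings.length : Int), 1)]) else d
      if d1.contains p.2.2.1 then d1.modify p.2.2.1 [] (fun l => l ++ [(p.1 + (node_matchings.length : Int), 1)]) else d1) c1
  (c2.values, "LessEqual", 0)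

-- ===== PORT B =====
-- literal transliteration of Source B: first-occurrence list of graph nodes (the 'not in / append'
-- loop is PySem.Set.add), then one row per node by rescanning node_matchings (comprehension =
-- filter + map) and edge_matchings (append loop = foldl).
def get_degree_constraint_alt (node_matchings : List (Int × Int)) (tree_degree : List (Int × Int)) (edge_matchings : List (Int × Int × Int × Int)) (tree_nodes : List Int) : (List (List (Int × Int))) × String × Int :=
  let n : Int := node_matchings.length
  let tdd := PySem.Dict.ofList tree_degree
  let seen := node_matchings.foldl (fun s p => PySem.Set.add s p.1) PySem.Set.empty
  let rows := seen.map (fun g =>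
    let row := ((PySem.List.enumerate node_matchings 0).filter (fun p => p.2.1 = g)).map
      (fun p => (p.1, -(tdd.getD p.2.2 2)))
    (PySem.List.enumerate edge_matchings 0).foldl
      (fun row p =>
        (row ++ (if p.2.1 = g then [(p.1 + n, (1 : Int))] else []))
          ++ (if p.2.2.1 = g then [(p.1 + n, (1 : Int))] else [])) row)
  (rows, "LessEqual", 0)

-- ===== PRECONDITION & SPEC =====
def Spec_get_degree_constraint (node_matchings : List (Int × Int)) (tree_degree : List (Int × Int)) (edge_matchings : List (Int × Int × Int × Int)) (tree_nodes : List Int) (out : (List (List (Int × Int))) × String × Int) : Prop := out = get_degree_constraint_alt node_matchings tree_degree edge_matchings tree_nodes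
instance (node_matchings : List (Int × Int)) (tree_degree : List (Int × Int)) (edge_matchings : List (Int × Int × Int × Int)) (tree_nodes : List Int) (out : (List (List (Int × Int))) × String × Int) : Decidable (Spec_get_degree_constraint node_matchings tree_degree edge_matchings tree_nodes out) := by unfold Spec_get_degree_constraint; infer_instance

-- ===== CLAIM =====
def Claim_equal_get_degree_constraint : Prop := ∀ (node_matchings : List (Int × Int)) (tree_degree : List (Int × Int)) (edge_matchings : List (Int × Int × Int × Int)) (tree_nodes : List Int), Dom_get_degree_constraint node_matchings tree_degree edge_matchings tree_nodes → Spec_get_degree_constraint node_matchings tree_degree edge_matchings tree_nodes (get_degree_constraint node_matchings tree_degree edge_matchings tree_nodes)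

-- ===== LEMMAS AND PROOFS =====

-- the edge entries that land in node k's row, in edge order (u before v within one edge)
def edgeEntries (n : Int) (l : List (Int × Int × Int × Int × Int)) (k : Int) : List (Int × Int) :=
  l.flatMap (fun p => (if p.2.1 = k then [(p.1 + n, (1 : Int))] else []) ++ (if p.2.2.1 = k then [(p.1 + n, (1 : Int))] else []))

-- B's edge-rescan loop for node k produces exactly edgeEntries, appended to the start row
theorem rowFoldB (n : Int) (l : List (Int × Int × Int × Int × Int)) (k : Int) (acc : List (Int × Int)) :
    (l.foldl (fun row p =>
        (row ++ (if p.2.1 = k then [(p.1 + n, (1 : Int))] else []))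
          ++ (if p.2.2.1 = k then [(p.1 + n, (1 : Int))] else [])) acc)
      = acc ++ edgeEntries n l k := by
  induction l generalizing acc with
  | nil => simp [edgeEntries]
  | cons p l ih =>
    rw [List.foldl_cons, ih]
    simp [edgeEntries, List.flatMap_cons, List.append_assoc]

-- one guarded conditional append of A's edge loop never changes the key list
theorem keys_guardStep (d : PySem.Dict Int (List (Int × Int))) (j : Int) (v : List (Int × Int) → List (Int × Int)) :
    (if d.contains j then d.modify j [] v else d).keys = d.keys := by
  split_ifs with h
  · rw [PySem.Dict.keys_modify, PySem.Dict.keys_insert_of_contains _ _ h]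
  · rfl

-- A's guarded edge loop never changes the key list
theorem keys_edgeFoldA (nm : List (Int × Int)) (l : List (Int × Int × Int × Int × Int)) (d : PySem.Dict Int (List (Int × Int))) :
    (l.foldl (fun (d : PySem.Dict Int (List (Int × Int))) (p : Int × Int × Int × Int × Int) =>
      let d1 := if d.contains p.2.1 then d.modify p.2.1 [] (fun l => l ++ [(p.1 + (nm.length : Int), 1)]) else d
      if d1.contains p.2.2.1 then d1.modify p.2.2.1 [] (fun l => l ++ [(p.1 + (nm.length : Int), 1)]) else d1) d).keys = d.keys := by
  induction l generalizing d with
  | nil => rfl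
  | cons p l ih =>
    rw [List.foldl_cons, ih]
    show (if _ then PySem.Dict.modify _ _ _ _ else _).keys = _
    rw [keys_guardStep, keys_guardStep]

-- one guarded conditional append, seen from an existing key k
theorem getD_guardStep (d : PySem.Dict Int (List (Int × Int))) (j k : Int) (w : List (Int × Int)) (hkd : k ∈ d.keys) :
    (if d.contains j then d.modify j [] (fun l => l ++ w) else d).getD k []
      = d.getD k [] ++ (if j = k then w else []) := by
  split_ifs with h hjk hjk
  · rw [PySem.Dict.getD_modify]; simp [hjk.symm]
  · rw [PySem.Dict.getD_modify]
    have hjk' : ¬ k = j := fun h => hjk (Eq.symm h)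
    simp [hjk']
  · exfalso; apply h; rw [hjk]
    exact (PySem.Dict.contains_iff_mem_keys d k).mpr hkd
  · simp

-- A's guarded edge loop appends exactly edgeEntries to the list of any existing key
theorem getD_edgeFoldA (nm : List (Int × Int)) (l : List (Int × Int × Int × Int × Int)) (d : PySem.Dict Int (List (Int × Int))) (k : Int)
    (hk : k ∈ d.keys) :
    (l.foldl (fun (d : PySem.Dict Int (List (Int × Int))) (p : Int × Int × Int × Int × Int) =>
      let d1 := if d.contains p.2.1 then d.modify p.2.1 [] (fun l => l ++ [(p.1 + (nm.length : Int), 1)]) else d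
      if d1.contains p.2.2.1 then d1.modify p.2.2.1 [] (fun l => l ++ [(p.1 + (nm.length : Int), 1)]) else d1) d).getD k []
      = d.getD k [] ++ edgeEntries (nm.length : Int) l k := by
  induction l generalizing d with
  | nil => simp [edgeEntries]
  | cons p l ih =>
    rw [List.foldl_cons]
    rw [ih _ (by rw [keys_guardStep, keys_guardStep]; exact hk)]
    show (if _ then PySem.Dict.modify _ _ _ _ else _).getD k [] ++ _ = _
    rw [getD_guardStep _ _ _ _ (by rw [keys_guardStep]; exact hk), getD_guardStep _ _ _ _ hk]
    by_cases h1 : p.2.1 = k <;> by_cases h2 : p.2.2.1 = k <;>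
      simp [h1, h2, edgeEntries, List.flatMap_cons, List.append_assoc]

-- ===== VERDICT =====
theorem get_degree_constraint_spec : Claim_equal_get_degree_constraint := by
  intro nm td em tn _
  show _ = get_degree_constraint_alt nm td em tn
  simp only [get_degree_constraint, get_degree_constraint_alt]
  set tdd := PySem.Dict.ofList td with htdd
  -- rewrite A's node fold through the map that exposes key and value
  have hfold : (PySem.List.enumerate nm 0).foldl
      (fun (d : PySem.Dict Int (List (Int × Int))) (p : Int × Int × Int) =>
        d.modify p.2.1 [] (fun l => l ++ [(p.1, -(tdd.getD p.2.2 2))])) PySem.Dict.empty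
      = (((PySem.List.enumerate nm 0).map (fun p => (p.2.1, (p.1, -(tdd.getD p.2.2 2))))).foldl
        (fun (d : PySem.Dict Int (List (Int × Int))) (q : Int × Int × Int) =>
          d.modify q.1 [] (fun l => l ++ [q.2])) PySem.Dict.empty) := by
    rw [List.foldl_map]
  rw [hfold]
  set l' := (PySem.List.enumerate nm 0).map (fun p : Int × Int × Int => (p.2.1, (p.1, -(tdd.getD p.2.2 2)))) with hl'
  set c1 := l'.foldl
    (fun (d : PySem.Dict Int (List (Int × Int))) (q : Int × Int × Int) =>
      d.modify q.1 [] (fun l => l ++ [q.2])) PySem.Dict.empty with hc1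
  have hnodup : c1.keys.Nodup := by
    rw [hc1]
    exact PySem.Dict.nodup_keys_foldl_modify_key l' (fun q => q.1) []
      (fun _ q => (fun l => l ++ [q.2])) PySem.Dict.empty PySem.Dict.nodup_keys_empty
  have hkeys1 : c1.keys = nm.foldl (fun s p => PySem.Set.add s p.1) PySem.Set.empty := by
    rw [hc1, PySem.Dict.keys_foldl_modify_key l' (fun q => q.1) []
      (fun _ q => (fun l => l ++ [q.2])) PySem.Dict.empty]
    have : l'.map (fun q => q.1) = nm.map (fun p => p.1) := by
      rw [hl', List.map_map]
      have h2 : (PySem.List.enumerate nm 0).map (fun p : Int × Int × Int => p.2.1)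
          = ((PySem.List.enumerate nm 0).map (fun p : Int × Int × Int => p.2)).map (fun p => p.1) := by
        rw [List.map_map]; rfl
      calc (PySem.List.enumerate nm 0).map ((fun q : Int × Int × Int => q.1) ∘ (fun p : Int × Int × Int => (p.2.1, (p.1, -(tdd.getD p.2.2 2)))))
          = (PySem.List.enumerate nm 0).map (fun p : Int × Int × Int => p.2.1) := rfl
        _ = _ := by rw [h2, PySem.List.map_snd_enumerate]
    rw [this]
    show PySem.Set.update PySem.Dict.empty.keys _ = _
    rw [PySem.Set.update, List.foldl_map]
    rfl
  refine Prod.ext ?_ rfl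
  have hkeys := keys_edgeFoldA nm (PySem.List.enumerate em 0) c1
  have hnodup2 : ((PySem.List.enumerate em 0).foldl
      (fun (d : PySem.Dict Int (List (Int × Int))) (p : Int × Int × Int × Int × Int) =>
        let d1 := if d.contains p.2.1 then d.modify p.2.1 [] (fun l => l ++ [(p.1 + (nm.length : Int), 1)]) else d
        if d1.contains p.2.2.1 then d1.modify p.2.2.1 [] (fun l => l ++ [(p.1 + (nm.length : Int), 1)]) else d1) c1).keys.Nodup := by
    rw [hkeys]; exact hnodup
  show PySem.Dict.values _ = List.map _ _
  rw [PySem.Dict.values_eq_map_keys _ hnodup2 [], hkeys, hkeys1]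
  refine List.map_congr_left ?_
  intro k hk
  rw [← hkeys1] at hk
  rw [getD_edgeFoldA nm _ c1 k hk]
  rw [rowFoldB]
  congr 1
  -- node rows agree: A's grouped list at k = B's filter/map rescan
  rw [hc1, PySem.Dict.getD_foldl_modify_append, PySem.Dict.getD_empty, List.nil_append, hl', List.filter_map, List.map_map]
  rfl
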